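-- pv_equiv track=rewrite | github.com/nikhilpolpakkara/MN_Colab | Streamlit/rough.py | split_lines_by_end
-- ===== SOURCE A (Python) =====
-- def split_lines_by_end(lines):
--     blocks = []
--     current_block = []
--
--     for line in lines:
--         current_block.append(line.strip())
--         if line.startswith("END"):
--             blocks.append(current_block)
--             current_block = []
--
--     return blocks
-- ===== SOURCE B (Python) =====
-- def split_lines_by_end(lines):
--     lines = list(lines)
--     blocks = []
--     while True:
--         k = next((i for i, ln in enumerate(lines) if ln.startswith("END")), None)
--         if k is None:
--             return blocks
--         blocks.append([ln.strip() for ln in lines[:k + 1]])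
--         lines = lines[k + 1:]
-- ===== Notes on version B (the rewrite author's own statement) =====
-- stated objective: alternative
-- what changed: Instead of accumulating a current block and flushing it on each END line, B repeatedly finds the index of the next END line, slices-and-strips that prefix as one block, and continues on the remainder (cut-point-then-slice decomposition); a trailing non-END remainder is discarded as in A.
import Mathlib
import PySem

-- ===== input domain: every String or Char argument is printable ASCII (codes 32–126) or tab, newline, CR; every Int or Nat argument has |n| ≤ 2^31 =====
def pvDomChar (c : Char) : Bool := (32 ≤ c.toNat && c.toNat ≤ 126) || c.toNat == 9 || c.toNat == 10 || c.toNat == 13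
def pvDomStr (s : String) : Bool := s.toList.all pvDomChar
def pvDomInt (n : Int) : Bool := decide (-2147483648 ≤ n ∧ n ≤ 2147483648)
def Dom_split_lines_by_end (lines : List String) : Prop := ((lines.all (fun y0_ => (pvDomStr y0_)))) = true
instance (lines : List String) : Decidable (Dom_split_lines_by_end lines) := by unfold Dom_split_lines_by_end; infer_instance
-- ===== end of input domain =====

-- B replaces A's accumulate-and-flush pass by a cut-point decomposition: find the next END
-- line, slice-and-strip that prefix as one block, recurse on the remainder (alternative, same cost).

-- ===== PORT A =====
def slbeStep (bc : List (List String) × List String) (line : String) :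
    List (List String) × List String :=
  let cur := bc.2 ++ [PySem.Str.strip line]
  if PySem.Str.startswith line "END" then (bc.1 ++ [cur], []) else (bc.1, cur)

def split_lines_by_end (lines : List String) : List (List String) :=
  (lines.foldl slbeStep ([], [])).1

-- ===== PORT B =====
-- repeated "find index of next END, slice prefix, strip it, continue on the rest"
def slbeGo (ls : List String) : List (List String) :=
  match h : ls.findIdx? (fun ln => PySem.Str.startswith ln "END") with
  | none => []
  | some k => ((ls.take (k + 1)).map PySem.Str.strip) :: slbeGo (ls.drop (k + 1))
termination_by ls.length
decreasing_by
  have hk : k < ls.length := by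
    rcases List.findIdx?_eq_some_iff_findIdx_eq.mp h with ⟨hlt, _⟩
    exact hlt
  simp [List.length_drop]; omega

def split_lines_by_end_alt (lines : List String) : List (List String) := slbeGo lines

-- ===== PRECONDITION & SPEC =====
def Spec_split_lines_by_end (lines : List String) (out : List (List String)) : Prop := out = split_lines_by_end_alt lines
instance (lines : List String) (out : List (List String)) : Decidable (Spec_split_lines_by_end lines out) := by unfold Spec_split_lines_by_end; infer_instance

-- ===== CLAIM (what is proved, stated in full; the proofs are below) =====
def Claim_equal_split_lines_by_end : Prop := ∀ (lines : List String), Dom_split_lines_by_end lines → Spec_split_lines_by_end lines (split_lines_by_end lines)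

-- ===== LEMMAS AND PROOFS =====

-- Unfolding equations for slbeGo, by case on the next END index.
theorem slbeGo_none (ls : List String)
    (h : ls.findIdx? (fun ln => PySem.Str.startswith ln "END") = none) : slbeGo ls = [] := by
  rw [slbeGo]
  split
  · rfl
  · rename_i k hk
    rw [h] at hk
    cases hk

theorem slbeGo_some (ls : List String) (k : Nat)
    (h : ls.findIdx? (fun ln => PySem.Str.startswith ln "END") = some k) :
    slbeGo ls = ((ls.take (k + 1)).map PySem.Str.strip) :: slbeGo (ls.drop (k + 1)) := by
  rw [slbeGo]
  split
  · rename_i hn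
    rw [h] at hn
    cases hn
  · rename_i k' hk
    rw [h] at hk
    injection hk with hkk
    subst hkk
    rfl

-- A's folded blocks-accumulator only grows by appending: peel it off.
theorem slbe_fold_acc (ls : List String) (acc : List (List String)) (cur : List String) :
    (ls.foldl slbeStep (acc, cur)).1 = acc ++ (ls.foldl slbeStep ([], cur)).1 := by
  induction ls generalizing acc cur with
  | nil => simp
  | cons l ls ih =>
    simp only [List.foldl_cons, slbeStep]
    cases h : PySem.Str.startswith l "END" with
    | true =>
      simp only [if_true]
      rw [ih (acc ++ [cur ++ [PySem.Str.strip l]]) [], ih ([] ++ [cur ++ [PySem.Str.strip l]]) []]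
      simp
    | false =>
      simp only [Bool.false_eq_true, if_false]
      exact ih acc (cur ++ [PySem.Str.strip l])

-- Characterisation of A's fold (with pending block cur) via B's cut-point recursion.
theorem slbe_fold_eq_go (ls : List String) (cur : List String) :
    (ls.foldl slbeStep ([], cur)).1 =
      match ls.findIdx? (fun ln => PySem.Str.startswith ln "END") with
      | none => []
      | some k => (cur ++ (ls.take (k + 1)).map PySem.Str.strip) :: slbeGo (ls.drop (k + 1)) := by
  induction ls generalizing cur with
  | nil => simp
  | cons l ls ih =>
    simp only [List.foldl_cons, slbeStep, List.findIdx?_cons]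
    cases h : PySem.Str.startswith l "END" with
    | true =>
      simp only [if_true]
      rw [slbe_fold_acc, ih []]
      cases hfi : ls.findIdx? (fun ln => PySem.Str.startswith ln "END") with
      | none => simp [slbeGo_none ls hfi]
      | some k => simp [slbeGo_some ls k hfi]
    | false =>
      simp only [Bool.false_eq_true, if_false]
      rw [ih (cur ++ [PySem.Str.strip l])]
      cases hfi : ls.findIdx? (fun ln => PySem.Str.startswith ln "END") with
      | none => simp
      | some k => simp [List.take_succ_cons]

-- ===== VERDICT (by name: the statement is the Claim_ definition above) =====
theorem split_lines_by_end_spec : Claim_equal_split_lines_by_end := by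
  intro lines _
  show split_lines_by_end lines = split_lines_by_end_alt lines
  unfold split_lines_by_end split_lines_by_end_alt
  rw [slbe_fold_eq_go]
  cases hfi : lines.findIdx? (fun ln => PySem.Str.startswith ln "END") with
  | none => simp [slbeGo_none lines hfi]
  | some k => simp [slbeGo_some lines k hfi]
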